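-- pv_equiv track=rewrite | github.com/linhdvu14/cp-sols | sols/CodeForces/1626_edu/C_Monsters_And_Spells.py | solve
-- ===== SOURCE A (Python) =====
-- def solve(N, K, H):
--     intervals = []
--     for k, h in zip(K, H):
--         intervals.append((k-h+1, k))
--     intervals.sort()
--
--     res = 0
--     l, r = intervals[0]
--     for i in range(1, len(intervals)):
--         l2, r2 = intervals[i]
--         if l2 > r:
--             h = r - l + 1
--             res += h * (h+1) // 2
--             l, r = l2, r2
--         else:
--             r = max(r, r2)
--
--     h = r - l + 1
--     res += h * (h+1) // 2
--
--     return res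
-- ===== SOURCE B (Python) =====
-- def solve(N, K, H):
--     stack = sorted((k - h + 1, k) for k, h in zip(K, H))
--     stack.reverse()  # smallest interval on top of the stack
--     res = 0
--     while stack:
--         l, r = stack.pop()
--         while stack and stack[-1][0] <= r:
--             r = max(r, stack.pop()[1])
--         L = r - l + 1
--         res += L * (L + 1) // 2
--     return res
-- ===== Notes on version B (the rewrite author's own statement) =====
-- stated objective: alternative
-- what changed: A scans the sorted intervals with a carried (res,l,r) merge state and a duplicated flush of the triangular term; B consumes a reverse-sorted stack, popping one whole component per outer step with a nested absorb loop, so the triangular term is emitted once per component and the empty input needs no special case.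
import Mathlib
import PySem

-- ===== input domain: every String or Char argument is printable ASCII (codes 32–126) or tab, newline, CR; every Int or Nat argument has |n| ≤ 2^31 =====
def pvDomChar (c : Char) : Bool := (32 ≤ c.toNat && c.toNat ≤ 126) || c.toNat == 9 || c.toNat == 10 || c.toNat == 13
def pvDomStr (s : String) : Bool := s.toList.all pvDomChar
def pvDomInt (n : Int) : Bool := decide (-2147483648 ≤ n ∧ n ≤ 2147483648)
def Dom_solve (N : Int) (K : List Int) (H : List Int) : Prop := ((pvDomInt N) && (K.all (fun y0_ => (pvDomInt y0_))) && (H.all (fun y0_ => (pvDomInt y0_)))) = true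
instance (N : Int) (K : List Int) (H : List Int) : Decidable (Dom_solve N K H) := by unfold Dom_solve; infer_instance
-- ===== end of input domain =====

-- B replaces A's carried (res,l,r) merge state by a stack popped one component per step; return values agree wherever A returns, and B returns 0 where A raises on empty input.

-- ===== PORT A =====
-- A's loop over range(1, len(intervals)) with state (res, l, r), as a foldl over the tail
def solveStep (st : Int × Int × Int) (p : Int × Int) : Int × Int × Int :=
  if p.1 > st.2.2 then
    (st.1 + PySem.Int.floordiv ((st.2.2 - st.2.1 + 1) * ((st.2.2 - st.2.1 + 1) + 1)) 2, p.1, p.2)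
  else
    (st.1, st.2.1, max st.2.2 p.2)

def solve (N : Int) (K : List Int) (H : List Int) : Int :=
  -- intervals = sorted((k-h+1, k) …): Python's tuple sort is PySem.List.sorted2 on (fst, snd)
  let intervals := PySem.List.sorted2 ((K.zip H).map (fun kh => (kh.1 - kh.2 + 1, kh.1))) (fun p => p.1) (fun p => p.2) false
  match intervals with
  | [] => 0  -- Python raises IndexError at intervals[0]; excluded by Pre_solve
  | (l0, r0) :: rest =>
    let st := rest.foldl solveStep (0, l0, r0)
    st.1 + PySem.Int.floordiv ((st.2.2 - st.2.1 + 1) * ((st.2.2 - st.2.1 + 1) + 1)) 2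

-- ===== PORT B =====
-- inner `while stack and stack[-1][0] <= r` of Source B; the Python stack (top = list end)
-- is represented top-first, so stack[-1]/pop() act on the list head
def popAbsorb (r : Int) : List (Int × Int) → Int × List (Int × Int)
  | [] => (r, [])
  | (l2, r2) :: st => if l2 ≤ r then popAbsorb (max r r2) st else (r, (l2, r2) :: st)

theorem popAbsorb_len_le (r : Int) (st : List (Int × Int)) :
    (popAbsorb r st).2.length ≤ st.length := by
  induction st generalizing r with
  | nil => simp [popAbsorb]
  | cons p t ih =>
    obtain ⟨l2, r2⟩ := p
    by_cases h : l2 ≤ r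
    · simpa [popAbsorb, h] using le_trans (ih (max r r2)) (Nat.le_succ _)
    · simp [popAbsorb, h]

-- outer `while stack` of Source B, accumulating res
def sweepStack : List (Int × Int) → Int → Int
  | [], res => res
  | (l, r) :: st, res =>
    let p := popAbsorb r st
    sweepStack p.2 (res + PySem.Int.floordiv ((p.1 - l + 1) * ((p.1 - l + 1) + 1)) 2)
termination_by st _ => st.length
decreasing_by
  exact Nat.lt_succ_of_le (popAbsorb_len_le r st)

def solve_alt (N : Int) (K : List Int) (H : List Int) : Int :=
  -- stack = sorted(…); stack.reverse()  — descending, smallest on top (= list end);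
  -- represented top-first for the pop loop, i.e. reversed once more
  let stack := (PySem.List.sorted2 ((K.zip H).map (fun kh => (kh.1 - kh.2 + 1, kh.1))) (fun p => p.1) (fun p => p.2) false).reverse
  sweepStack stack.reverse 0

-- ===== PRECONDITION & SPEC =====
-- Pre_ excludes exactly the inputs where zip(K, H) is empty: A raises IndexError at intervals[0] there.
def Pre_solve (N : Int) (K : List Int) (H : List Int) : Prop := K ≠ [] ∧ H ≠ []
instance (N : Int) (K : List Int) (H : List Int) : Decidable (Pre_solve N K H) := by unfold Pre_solve; infer_instance

def pvWitness_solve : Int × List Int × List Int := (3, [5, 1, 10], [2, 1, 3])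

def Spec_solve (N : Int) (K : List Int) (H : List Int) (out : Int) : Prop := out = solve_alt N K H
instance (N : Int) (K : List Int) (H : List Int) (out : Int) : Decidable (Spec_solve N K H out) := by unfold Spec_solve; infer_instance

-- ===== CLAIM (what is proved, stated in full; the proofs are below) =====
def Claim_equal_solve : Prop := ∀ (N : Int) (K : List Int) (H : List Int), Dom_solve N K H → Pre_solve N K H → Spec_solve N K H (solve N K H)

-- ===== LEMMAS AND PROOFS =====

-- A's final 'res + h*(h+1)//2' applied to the fold state (proof-only helper)
def finishA (st : Int × Int × Int) : Int :=
  st.1 + PySem.Int.floordiv ((st.2.2 - st.2.1 + 1) * ((st.2.2 - st.2.1 + 1) + 1)) 2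

-- A's fold from state (res, l, r) over any tail equals B's stack sweep of (l, r) :: lst
theorem fold_eq_sweep (lst : List (Int × Int)) :
    ∀ (res l r : Int),
      finishA (lst.foldl solveStep (res, l, r)) = sweepStack ((l, r) :: lst) res := by
  induction lst with
  | nil =>
    intro res l r
    simp [finishA, sweepStack, popAbsorb]
  | cons p t ih =>
    intro res l r
    obtain ⟨l2, r2⟩ := p
    by_cases h : l2 > r
    · have hle : ¬ l2 ≤ r := not_le.mpr h
      simp only [List.foldl_cons, solveStep, if_pos h]
      rw [ih]
      simp [sweepStack, popAbsorb, hle]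
    · have hle : l2 ≤ r := not_lt.mp h
      simp only [List.foldl_cons, solveStep, if_neg h]
      rw [ih]
      simp [sweepStack, popAbsorb, hle]

theorem zip_map_ne_nil (K H : List Int) (hK : K ≠ []) (hH : H ≠ []) :
    ((K.zip H).map (fun kh : Int × Int => (kh.1 - kh.2 + 1, kh.1))) ≠ [] := by
  cases K with
  | nil => exact absurd rfl hK
  | cons k ks =>
    cases H with
    | nil => exact absurd rfl hH
    | cons h hs => simp [List.zip]

-- ===== VERDICT (by name: the statement is the Claim_ definition above) =====
theorem solve_spec : Claim_equal_solve := by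
  intro N K H _hDom hPre
  unfold Spec_solve
  have hne : PySem.List.sorted2 ((K.zip H).map (fun kh => (kh.1 - kh.2 + 1, kh.1))) (fun p => p.1) (fun p => p.2) false ≠ [] := by
    intro hnil
    have hperm := PySem.List.sorted2_perm ((K.zip H).map (fun kh : Int × Int => (kh.1 - kh.2 + 1, kh.1))) (fun p => p.1) (fun p => p.2) false
    rw [hnil] at hperm
    exact zip_map_ne_nil K H hPre.1 hPre.2 (List.Perm.nil_eq hperm).symm
  cases hsort : PySem.List.sorted2 ((K.zip H).map (fun kh => (kh.1 - kh.2 + 1, kh.1))) (fun p => p.1) (fun p => p.2) false with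
  | nil => exact absurd hsort hne
  | cons p rest =>
    obtain ⟨l0, r0⟩ := p
    simp only [solve, solve_alt, hsort, List.reverse_reverse]
    simpa [finishA] using fold_eq_sweep rest 0 l0 r0
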